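-- pv_equiv track=rewrite | github.com/ZeroKlu/python-crash-course | 01 - Python Crash Course/Part III - Beyond the Book/S04_Big_O_Complexity/08_heap_sort.py | make_heap
-- ===== SOURCE A (Python) =====
-- def make_heap(array: list[int], n: int, i: int, count: int) -> int:
--     """Create the heap structure for heap sorting"""
--     largest = i
--     l = 2 * i + 1
--     r = 2 * i + 2
--
--     if l < n and array[largest] < array[l]:
--         largest = l
--
--     if r < n and array[largest] < array[r]:
--         largest = r
--
--     if largest != i:
--         count += 1
--         array[i], array[largest] = array[largest], array[i]
--         count = make_heap(array, n, largest, count)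
--
--     return count
-- ===== SOURCE B (Python) =====
-- def make_heap(array: list[int], n: int, i: int, count: int) -> int:
--     """Two phases instead of A's recursive swapping: first find the whole
--     descent path purely (reading only the untouched original array, carrying
--     the sifted value), then apply the path as one rotation and count its
--     length."""
--     path = [i]
--     j = i
--     while 2 * j + 1 < n:
--         v = array[i]
--         l, r = 2 * j + 1, 2 * j + 2
--         big, bigv = j, v
--         if array[l] > bigv:
--             big, bigv = l, array[l]
--         if r < n and array[r] > bigv:
--             big, bigv = r, array[r]
--         if big == j:
--             break
--         path.append(big)
--         j = big
--     if len(path) > 1: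
--         v = array[path[0]]
--         for k in range(len(path) - 1):
--             array[path[k]] = array[path[k + 1]]
--         array[path[-1]] = v
--     return count + len(path) - 1
-- ===== Notes on version B (the rewrite author's own statement) =====
-- stated objective: alternative
-- what changed: Replaces A's recursive swap-as-you-go sift-down by a two-phase version: a pure loop that finds the whole descent path by carrying the sifted value and reading only the untouched original array (no mutation during the search), then one rotation of the array along that path; the result is count plus the path length minus one.
-- outside the precondition, e.g. on make_heap([3, 1], 2, -1, 0): A returns 2, B returns 1; on make_heap([1, 2, 3], 4, 0, 0): A returns 1, B returns 1
import Mathlib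
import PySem

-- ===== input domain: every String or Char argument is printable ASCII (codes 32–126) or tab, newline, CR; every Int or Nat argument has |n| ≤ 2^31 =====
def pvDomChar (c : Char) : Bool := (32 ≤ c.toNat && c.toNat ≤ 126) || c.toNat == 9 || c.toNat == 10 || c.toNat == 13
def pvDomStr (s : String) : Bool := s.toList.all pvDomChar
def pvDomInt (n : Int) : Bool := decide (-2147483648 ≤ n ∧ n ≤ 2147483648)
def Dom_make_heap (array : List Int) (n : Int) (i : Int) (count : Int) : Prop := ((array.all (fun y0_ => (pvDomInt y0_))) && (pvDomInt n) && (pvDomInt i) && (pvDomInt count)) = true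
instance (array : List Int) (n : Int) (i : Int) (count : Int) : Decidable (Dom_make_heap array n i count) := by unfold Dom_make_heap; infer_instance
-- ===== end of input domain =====

-- B replaces A's recursive swap-as-you-go sift-down by a two-phase version: a pure loop
-- finds the descent path (carrying the sifted value, reading only the original array),
-- then one rotation applies it; the return value is count + path length - 1.
-- A mutates `array` in place (B's rotation produces the same final array); the
-- equivalence proved here is about the return value only.


-- ===== PORT A =====
-- Reads use PySem.List.pyGetD (default 0) and writes PySem.List.pySetD: inside Pre_ every
-- accessed index is nonnegative and in range, where these agree exactly with Python's
-- array[k]; out of range Python raises IndexError (excluded by Pre_) and the default is a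
-- mere totality guard. Python's swap `array[i], array[largest] = array[largest], array[i]`
-- reads both elements first, then assigns.
def pySwap (xs : List Int) (i j : Int) : List Int :=
  PySem.List.pySetD (PySem.List.pySetD xs i (PySem.List.pyGetD xs j 0)) j
    (PySem.List.pyGetD xs i 0)

-- A's tail recursion, fueled for totality only: inside Pre_ the recursion index strictly
-- increases and stays below n, so fuel n.toNat + 1 is never exhausted there.
def make_heap_go : Nat → List Int → Int → Int → Int → Int
  | 0, _, _, _, count => count
  | fuel+1, array, n, i, count =>
    let l := 2 * i + 1
    let r := 2 * i + 2
    let largest := i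
    let largest :=
      if l < n ∧ PySem.List.pyGetD array largest 0 < PySem.List.pyGetD array l 0 then l
      else largest
    let largest :=
      if r < n ∧ PySem.List.pyGetD array largest 0 < PySem.List.pyGetD array r 0 then r
      else largest
    if largest ≠ i then
      make_heap_go fuel (pySwap array i largest) n largest (count + 1)
    else count

def make_heap (array : List Int) (n : Int) (i : Int) (count : Int) : Int :=
  make_heap_go (n.toNat + 1) array n i count

-- ===== PORT B =====
-- Source B's `while 2*j+1 < n` path-finding loop as a fueled state recursion over
-- (j, path); the array is never modified during the search (B reads the original
-- array and carries the sifted value v = array[i]).  Source B's final rotation only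
-- mutates `array` and does not contribute to the Int return value, which is
-- count + len(path) - 1.
def find_path : Nat → List Int → Int → Int → Int → List Int → List Int
  | 0, _, _, _, _, path => path
  | fuel+1, array, n, i, j, path =>
    if 2 * j + 1 < n then
      let v := PySem.List.pyGetD array i 0
      let l := 2 * j + 1
      let r := 2 * j + 2
      let bp : Int × Int := (j, v)
      let bp := if PySem.List.pyGetD array l 0 > bp.2 then (l, PySem.List.pyGetD array l 0) else bp
      let bp := if r < n ∧ PySem.List.pyGetD array r 0 > bp.2 then (r, PySem.List.pyGetD array r 0) else bp
      if bp.1 = j then path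
      else find_path fuel array n i bp.1 (path ++ [bp.1])
    else path

def make_heap_alt (array : List Int) (n : Int) (i : Int) (count : Int) : Int :=
  let path := find_path (n.toNat + 1) array n i i [i]
  count + (path.length : Int) - 1

-- ===== PRECONDITION & SPEC =====
-- A raises IndexError when the sift-down reaches an index outside the array; Pre_ admits
-- the function's natural domain (heap root 0 ≤ i with heap size n ≤ len(array)) plus the
-- no-child immediate-return case n ≤ 2*i+1.  This also excludes some inputs on which A
-- happens to return (children luckily in range, or negative-index wraparound); B returns
-- the same value on those too, but they are accidents of Python indexing, not the task.
def Pre_make_heap (array : List Int) (n : Int) (i : Int) (count : Int) : Prop :=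
  (0 ≤ i ∧ n ≤ (array.length : Int)) ∨ n ≤ 2 * i + 1
instance (array : List Int) (n : Int) (i : Int) (count : Int) : Decidable (Pre_make_heap array n i count) := by unfold Pre_make_heap; infer_instance
def pvWitness_make_heap : List Int × Int × Int × Int := ([1, 5, 3, 2, 4], 5, 0, 0)
def Spec_make_heap (array : List Int) (n : Int) (i : Int) (count : Int) (out : Int) : Prop := out = make_heap_alt array n i count
instance (array : List Int) (n : Int) (i : Int) (count : Int) (out : Int) : Decidable (Spec_make_heap array n i count out) := by unfold Spec_make_heap; infer_instance

-- ===== CLAIM (what is proved, stated in full; the proofs are below) =====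
def Claim_equal_make_heap : Prop := ∀ (array : List Int) (n : Int) (i : Int) (count : Int), Dom_make_heap array n i count → Pre_make_heap array n i count → Spec_make_heap array n i count (make_heap array n i count)

-- ===== LEMMAS AND PROOFS =====

lemma pySwap_length (xs : List Int) (i j : Int) : (pySwap xs i j).length = xs.length := by
  simp [pySwap, PySem.List.length_pySetD]

-- reading through an in-range nonnegative write (any nonnegative read index)
lemma pyGetD_pySetD' (xs : List Int) (a m v d : Int) (ha : 0 ≤ a)
    (hlt : a < (xs.length : Int)) (hm : 0 ≤ m) :
    PySem.List.pyGetD (PySem.List.pySetD xs a v) m d =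
      if m = a then v else PySem.List.pyGetD xs m d := by
  obtain ⟨A, rfl⟩ : ∃ A : Nat, a = (A : Int) := ⟨a.toNat, by omega⟩
  obtain ⟨M, rfl⟩ : ∃ M : Nat, m = (M : Int) := ⟨m.toNat, by omega⟩
  rw [PySem.List.pyGetD_pySetD_natCast xs A M v d (by omega)]
  simp only [Int.natCast_inj]

-- reading pySwap xs j largest at an index k > largest > j is reading xs
lemma pyGetD_pySwap_high (xs : List Int) (j largest k d : Int) (h0 : 0 ≤ j)
    (hjl : j < largest) (hlen : largest < (xs.length : Int)) (hk : largest < k) :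
    PySem.List.pyGetD (pySwap xs j largest) k d = PySem.List.pyGetD xs k d := by
  unfold pySwap
  rw [pyGetD_pySetD' _ _ _ _ _ (by omega) (by simp [PySem.List.length_pySetD]; omega) (by omega),
      if_neg (by omega),
      pyGetD_pySetD' _ _ _ _ _ h0 (by omega) (by omega), if_neg (by omega)]

lemma pyGetD_pySwap_self (xs : List Int) (j largest : Int) (h0 : 0 ≤ j)
    (hjl : j < largest) (hlen : largest < (xs.length : Int)) :
    PySem.List.pyGetD (pySwap xs j largest) largest 0 = PySem.List.pyGetD xs j 0 := by
  unfold pySwap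
  rw [pyGetD_pySetD' _ _ _ _ _ (by omega) (by simp [PySem.List.length_pySetD]; omega) (by omega),
      if_pos rfl]

-- The loop invariant: A's mutated array agrees with the original above the current
-- node j and carries the sifted value v = array[i] at j; under it, A's remaining
-- swap count equals the growth of B's path.
lemma go_eq_path (fuel : Nat) :
    ∀ (arrA array : List Int) (n i j count : Int) (path : List Int),
      0 ≤ j → n ≤ (arrA.length : Int) → arrA.length = array.length →
      PySem.List.pyGetD arrA j 0 = PySem.List.pyGetD array i 0 →
      (∀ k, j < k → PySem.List.pyGetD arrA k 0 = PySem.List.pyGetD array k 0) →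
      make_heap_go fuel arrA n j count =
        count + ((find_path fuel array n i j path).length : Int) - (path.length : Int) := by
  induction fuel with
  | zero => intro _ _ _ _ _ _ _ _ _ _ _ _; simp [make_heap_go, find_path]
  | succ fuel ih =>
    intro arrA array n i j count path hj hn hlen hv hinv
    by_cases hl : 2 * j + 1 < n
    · have hAl : PySem.List.pyGetD arrA (2 * j + 1) 0 = PySem.List.pyGetD array (2 * j + 1) 0 :=
        hinv _ (by omega)
      have hAr : PySem.List.pyGetD arrA (2 * j + 2) 0 = PySem.List.pyGetD array (2 * j + 2) 0 :=
        hinv _ (by omega)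
      have hrec : ∀ big : Int, j < big → big < n →
          make_heap_go fuel (pySwap arrA j big) n big (count + 1) =
            count + ((find_path fuel array n i big (path ++ [big])).length : Int) -
              (path.length : Int) := by
        intro big hjb hbn
        rw [ih (pySwap arrA j big) array n i big (count + 1) (path ++ [big]) (by omega)
              (by rw [pySwap_length]; omega) (by rw [pySwap_length]; omega)
              (by rw [pyGetD_pySwap_self _ _ _ hj hjb (by omega)]; exact hv)
              (fun k hk => by
                rw [pyGetD_pySwap_high _ _ _ _ _ hj hjb (by omega) hk]
                exact hinv k (by omega))]
        simp only [List.length_append, List.length_cons, List.length_nil]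
        push_cast
        ring
      simp only [make_heap_go, find_path, if_pos hl, gt_iff_lt, ne_eq]
      by_cases hc1 : PySem.List.pyGetD array i 0 < PySem.List.pyGetD array (2 * j + 1) 0
      · by_cases hc2 : 2 * j + 2 < n ∧
            PySem.List.pyGetD array (2 * j + 1) 0 < PySem.List.pyGetD array (2 * j + 2) 0
        · simp only [hv, hAl, hAr, hl, hc1, hc2, true_and, and_true, if_true, ite_true, eq_self_iff_true, not_true]
          rw [if_pos (show ¬((2 * j + 2 : Int) = j) by omega),
              if_neg (show ¬((2 * j + 2 : Int) = j) by omega)]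
          exact hrec _ (by omega) hc2.1
        · simp only [hv, hAl, hAr, hl, hc1, hc2, true_and, and_true, if_true, ite_true, if_false, ite_false, eq_self_iff_true, not_true]
          rw [if_pos (show ¬((2 * j + 1 : Int) = j) by omega),
              if_neg (show ¬((2 * j + 1 : Int) = j) by omega)]
          exact hrec _ (by omega) (by omega)
      · by_cases hc2 : 2 * j + 2 < n ∧
            PySem.List.pyGetD array i 0 < PySem.List.pyGetD array (2 * j + 2) 0
        · simp only [hv, hAl, hAr, hl, hc1, hc2, true_and, and_true, if_true, ite_true, if_false, ite_false, eq_self_iff_true, not_true]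
          rw [if_pos (show ¬((2 * j + 2 : Int) = j) by omega),
              if_neg (show ¬((2 * j + 2 : Int) = j) by omega)]
          exact hrec _ (by omega) hc2.1
        · simp only [hv, hAl, hAr, hl, hc1, hc2, true_and, and_true, if_true, ite_true, if_false, ite_false, eq_self_iff_true, not_true, not_false_eq_true]
          ring
    · -- no left child below n: A's two conditions are false, B's loop guard fails
      simp only [make_heap_go, find_path, if_neg hl, ne_eq]
      rw [if_neg (show ¬ (2 * j + 1 < n ∧ PySem.List.pyGetD arrA j 0 <
            PySem.List.pyGetD arrA (2 * j + 1) 0) from fun h => absurd h.1 hl)]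
      rw [if_neg (show ¬ (2 * j + 2 < n ∧ PySem.List.pyGetD arrA j 0 <
            PySem.List.pyGetD arrA (2 * j + 2) 0) from fun h => absurd h.1 (by omega))]
      rw [if_neg (not_not_intro rfl)]
      ring

-- degenerate case n ≤ 2*j+1: both sides return immediately for any array
lemma go_eq_path_trivial (fuel : Nat) (arrA array : List Int) (n i j count : Int)
    (path : List Int) (h : n ≤ 2 * j + 1) :
    make_heap_go fuel arrA n j count =
      count + ((find_path fuel array n i j path).length : Int) - (path.length : Int) := by
  cases fuel with
  | zero => simp [make_heap_go, find_path]
  | succ fuel =>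
    simp only [make_heap_go, find_path, if_neg (show ¬(2 * j + 1 < n) by omega)]
    rw [if_neg (fun hx : (2 * j + 1 < n ∧ _) => absurd hx.1 (by omega)),
        if_neg (fun hx : (2 * j + 2 < n ∧ _) => absurd hx.1 (by omega)),
        if_neg (not_not_intro rfl)]
    ring

-- ===== VERDICT (by name: the statement is the Claim_ definition above) =====
theorem make_heap_spec : Claim_equal_make_heap := by
  intro array n i count _ hpre
  unfold Spec_make_heap make_heap make_heap_alt
  rcases hpre with ⟨hi, hn⟩ | htriv
  · simpa using go_eq_path (n.toNat + 1) array array n i i count [i] hi hn rfl rfl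
      (fun k _ => rfl)
  · simpa using go_eq_path_trivial (n.toNat + 1) array array n i i count [i] htriv
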